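-- pv_equiv track=rewrite | github.com/MFaisalJaffer/CommentInfo | lines.py | validComment
-- ===== SOURCE A (Python) =====
-- def validComment(line, syntax):
-- 	singleQuote = False
-- 	doubleQuote = False
-- 	for c in range(len(line)):
-- 		if line[c] == '"':
-- 			if not singleQuote: # only open double quote if no open single quote appears before
-- 				doubleQuote = not doubleQuote
-- 		elif line[c] == "'":
-- 			if not doubleQuote: # only open single quote if no open double quote appears before
-- 				singleQuote = not singleQuote
-- 		if syntax == line[c:c+len(syntax)]:
-- 			if not singleQuote and not doubleQuote: # only if syntax appears in line and no open quote
-- 				return True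
-- 	return False # no syntax appears in line or syntax appears inside open quotes
-- ===== SOURCE B (Python) =====
-- def validComment(line, syntax):
--     # One pass: quote state after each character, then scan occurrences with str.find.
--     states = []
--     single = double = False
--     for ch in line:
--         if ch == '"':
--             if not single:
--                 double = not double
--         elif ch == "'":
--             if not double:
--                 single = not single
--         states.append(single or double)
--     if len(syntax) == 0:
--         return any(not s for s in states)
--     i = line.find(syntax)
--     while i != -1:
--         if not states[i]:
--             return True
--         i = line.find(syntax, i + 1)
--     return False
-- ===== Notes on version B (the rewrite author's own statement) =====
-- stated objective: faster
-- what changed: Instead of comparing a length-m slice against the syntax at every index (O(n*m)), B precomputes the per-index quote state in one pass and then visits only the actual occurrences of the syntax via str.find, checking the precomputed state at each.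
import Mathlib
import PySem

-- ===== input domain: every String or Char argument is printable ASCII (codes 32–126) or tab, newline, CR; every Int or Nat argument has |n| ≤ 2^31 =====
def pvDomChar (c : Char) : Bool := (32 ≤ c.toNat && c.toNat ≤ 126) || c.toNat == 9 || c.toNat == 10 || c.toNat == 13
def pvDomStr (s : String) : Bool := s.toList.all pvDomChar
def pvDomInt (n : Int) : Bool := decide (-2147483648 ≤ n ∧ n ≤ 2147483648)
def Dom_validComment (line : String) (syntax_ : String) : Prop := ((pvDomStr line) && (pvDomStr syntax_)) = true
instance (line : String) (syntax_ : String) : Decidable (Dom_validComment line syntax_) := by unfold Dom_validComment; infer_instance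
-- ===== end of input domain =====

-- B precomputes the per-index quote state in one pass and scans only str.find occurrences of the
-- syntax, instead of A's slice comparison at every index (constant-factor faster; exact equivalence).


-- ===== PORT A =====
-- A's loop 'for c in range(len(line))' as structural recursion on the suffix of line at c:
-- line[c] is the head of the suffix, and line[c:c+len(syntax)] (0 ≤ c) is 'take syntax.length' of the suffix.
def vcGoA (syn : List Char) : List Char → Bool → Bool → Bool
  | [], _, _ => false
  | ch :: rest, singleQuote, doubleQuote =>
    -- the two branches are mutually exclusive (an if/elif on the same character)
    let singleQuote' := if ch = '\'' && !doubleQuote then !singleQuote else singleQuote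
    let doubleQuote' := if ch = '"' && !singleQuote then !doubleQuote else doubleQuote
    if decide (syn = List.take syn.length (ch :: rest)) && !singleQuote' && !doubleQuote' then true
    else vcGoA syn rest singleQuote' doubleQuote'

def validComment (line : String) (syntax_ : String) : Bool :=
  vcGoA syntax_.toList line.toList false false

-- ===== PORT B =====
-- Source B's first pass: the list 'states', states[c] = (single or double) after consuming line[c]
def vcStates : List Char → Bool → Bool → List Bool
  | [], _, _ => []
  | ch :: rest, single, double =>
    let single' := if ch = '\'' && !double then !single else single
    let double' := if ch = '"' && !single then !double else double
    (single' || double') :: vcStates rest single' double'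

-- Source B's while loop over i = line.find(syntax, ...); fuel bounds the (strictly increasing) find results
def vcLoop (cs syn : List Char) (states : List Bool) : Nat → Int → Bool
  | 0, _ => false
  | fuel + 1, i =>
    if i = -1 then false
    else if !(PySem.List.pyGetD states i false) then true  -- states[i]; i is always in range here
    else vcLoop cs syn states fuel (PySem.Chars.findFrom cs syn (i + 1) none)

def validComment_alt (line : String) (syntax_ : String) : Bool :=
  let cs := line.toList
  let syn := syntax_.toList
  let states := vcStates cs false false
  if syn.length = 0 then states.any (fun s => !s)
  else vcLoop cs syn states (cs.length + 1) (PySem.Chars.find cs syn)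

-- ===== PRECONDITION & SPEC =====
def Spec_validComment (line : String) (syntax_ : String) (out : Bool) : Prop := out = validComment_alt line syntax_
instance (line : String) (syntax_ : String) (out : Bool) : Decidable (Spec_validComment line syntax_ out) := by unfold Spec_validComment; infer_instance

-- ===== CLAIM (what is proved, stated in full; the proofs are below) =====
def Claim_equal_validComment : Prop := ∀ (line : String) (syntax_ : String), Dom_validComment line syntax_ → Spec_validComment line syntax_ (validComment line syntax_)

-- ===== LEMMAS AND PROOFS =====

theorem vcStates_length (cs : List Char) (sq dq : Bool) : (vcStates cs sq dq).length = cs.length := by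
  induction cs generalizing sq dq with
  | nil => rfl
  | cons ch rest ih => simp [vcStates, ih]

-- A's loop returns true iff some position j carries an occurrence of syn and a clean quote state
theorem vcGoA_iff (syn : List Char) (cs : List Char) (sq dq : Bool) :
    vcGoA syn cs sq dq = true ↔
      ∃ j, (vcStates cs sq dq)[j]? = some false ∧ syn <+: cs.drop j := by
  induction cs generalizing sq dq with
  | nil => simp [vcGoA, vcStates]
  | cons ch rest ih =>
    simp only [vcGoA, vcStates]
    set sq' := if ch = '\'' && !dq then !sq else sq with hsq
    set dq' := if ch = '"' && !sq then !dq else dq with hdq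
    by_cases hc : (decide (syn = List.take syn.length (ch :: rest)) && !sq' && !dq') = true
    · simp only [hc, if_true, true_iff]
      refine ⟨0, ?_, ?_⟩
      · simp only [List.getElem?_cons_zero, Option.some.injEq]
        simp only [Bool.and_eq_true, decide_eq_true_eq, Bool.not_eq_true'] at hc
        simp [hc.1.2, hc.2]
      · simp only [List.drop_zero]
        simp only [Bool.and_eq_true, decide_eq_true_eq] at hc
        exact List.prefix_iff_eq_take.2 hc.1.1
    · simp only [hc, Bool.false_eq_true, if_false]
      rw [ih]
      constructor
      · rintro ⟨j, h1, h2⟩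
        exact ⟨j + 1, by simpa using h1, by simpa using h2⟩
      · rintro ⟨j, h1, h2⟩
        cases j with
        | zero =>
          exfalso
          simp only [List.getElem?_cons_zero, Option.some.injEq] at h1
          simp only [List.drop_zero] at h2
          apply hc
          simp only [Bool.and_eq_true, decide_eq_true_eq, Bool.not_eq_true']
          rw [List.prefix_iff_eq_take] at h2
          have h1' := Bool.or_eq_false_iff.1 h1
          exact ⟨⟨h2, h1'.1⟩, h1'.2⟩
        | succ j =>
          exact ⟨j, by simpa using h1, by simpa using h2⟩

theorem prefix_drop_infix {syn cs : List Char} {j : Nat} (h : syn <+: cs.drop j) : syn <:+: cs :=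
  h.isInfix.trans (cs.drop_suffix j).isInfix

-- B's find-driven loop, started at search position k, finds exactly the clean occurrences at j ≥ k
theorem vcLoop_iff (cs syn : List Char) (states : List Bool)
    (hlen : states.length = cs.length) (hsyn : syn ≠ []) :
    ∀ (fuel k : Nat), k ≤ cs.length → cs.length + 1 - k ≤ fuel →
      (vcLoop cs syn states fuel (PySem.Chars.findFrom cs syn (k : Int) none) = true ↔
        ∃ j, k ≤ j ∧ states[j]? = some false ∧ syn <+: cs.drop j) := by
  intro fuel
  induction fuel with
  | zero => intro k hk hf; exact absurd hf (by omega)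
  | succ fuel ih =>
    intro k hk hf
    by_cases hneg : PySem.Chars.findFrom cs syn (k : Int) none = -1
    · rw [hneg]
      rw [show vcLoop cs syn states (fuel + 1) (-1) = false from by simp [vcLoop]]
      simp only [Bool.false_eq_true, false_iff]
      rintro ⟨j, hkj, _, hpre⟩
      rw [PySem.Chars.findFrom_natCast_eq_neg_one_iff cs syn k hk] at hneg
      apply hneg
      have : syn <+: (cs.drop k).drop (j - k) := by
        rw [List.drop_drop, show k + (j - k) = j from by omega]; exact hpre
      exact prefix_drop_infix this
    · obtain ⟨hki, hpre, hmin⟩ := PySem.Chars.findFrom_natCast_spec cs syn k hk hneg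
      set i := PySem.Chars.findFrom cs syn (k : Int) none with hi
      have hi0 : 0 ≤ i := le_trans (by exact_mod_cast Int.natCast_nonneg k) hki
      have hitn : i.toNat < cs.length := by
        have hdrop : cs.drop i.toNat ≠ [] := by
          intro hnil
          rw [hnil] at hpre
          exact hsyn (List.prefix_nil.1 hpre)
        by_contra hge
        exact hdrop (List.drop_eq_nil_of_le (by omega))
      have hkin : k ≤ i.toNat := by omega
      simp only [vcLoop]
      rw [if_neg hneg]
      have hget : PySem.List.pyGetD states i false = states.getD i.toNat false :=
        PySem.List.pyGetD_of_nonneg states false hi0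
      obtain ⟨b, hb⟩ : ∃ b, states[i.toNat]? = some b :=
        ⟨states[i.toNat]'(by omega), List.getElem?_eq_getElem _⟩
      have hgetb : states.getD i.toNat false = b := by
        simp [List.getD_eq_getElem?_getD, hb]
      cases b with
      | false =>
        simp only [hget, hgetb, Bool.not_false, if_true, true_iff]
        exact ⟨i.toNat, by omega, hb, hpre⟩
      | true =>
        simp only [hget, hgetb, Bool.not_true, Bool.false_eq_true, if_false]
        have hcast : i + 1 = ((i.toNat + 1 : Nat) : Int) := by omega
        rw [hcast, ih (i.toNat + 1) (by omega) (by omega)]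
        constructor
        · rintro ⟨j, hj, h1, h2⟩
          exact ⟨j, by omega, h1, h2⟩
        · rintro ⟨j, hj, h1, h2⟩
          refine ⟨j, ?_, h1, h2⟩
          rcases lt_trichotomy j i.toNat with hlt | heq | hgt
          · exact absurd h2 (hmin j hj hlt)
          · rw [heq] at h1; rw [h1] at hb; cases hb
          · omega

-- assembling: both programs are true iff a clean occurrence exists
theorem validComment_eq (line syntax_ : String) : validComment line syntax_ = validComment_alt line syntax_ := by
  rw [Bool.eq_iff_iff]
  unfold validComment validComment_alt
  rw [vcGoA_iff]
  set cs := line.toList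
  set syn := syntax_.toList
  set states := vcStates cs false false with hst
  have hlen : states.length = cs.length := vcStates_length cs false false
  by_cases hnil : syn.length = 0
  · have hsyn : syn = [] := List.length_eq_zero_iff.1 hnil
    rw [if_pos hnil]
    simp only [hsyn, List.nil_prefix, and_true]
    constructor
    · rintro ⟨j, hj⟩
      rw [List.any_eq_true]
      exact ⟨false, List.mem_of_getElem? hj, rfl⟩
    · intro h
      rw [List.any_eq_true] at h
      obtain ⟨b, hb, hbf⟩ := h
      have hbf' : b = false := by cases b <;> simp_all
      subst hbf'
      obtain ⟨j, hjlt, hj⟩ := List.getElem_of_mem hb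
      exact ⟨j, by rw [List.getElem?_eq_getElem hjlt, hj]⟩
  · have hsyn : syn ≠ [] := fun h => hnil (by simp [h])
    rw [if_neg hnil]
    rw [← PySem.Chars.findFrom_zero cs syn]
    have h0 : ((0 : Nat) : Int) = (0 : Int) := rfl
    rw [← h0, vcLoop_iff cs syn states hlen hsyn (cs.length + 1) 0 (Nat.zero_le _) (by omega)]
    simp

-- ===== VERDICT (by name: the statement is the Claim_ definition above) =====
theorem validComment_spec : Claim_equal_validComment := by
  intro line syntax_ _
  unfold Spec_validComment
  exact validComment_eq line syntax_
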